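-- pv_equiv track=rewrite | github.com/andres21feli/ST0245-002 | laboratorios/lab02/ejercicioEnLinea/Array3.py | squareUp
-- ===== SOURCE A (Python) =====
-- def squareUp(n):                                      # C0
--     square = []                                       # C1
--     for i in range(n,0,-1):                           # C2 * n
--         for j in range(1,n+1):                        # C3 * n * n
--             if j <= i:                                # C4 * n^2
--                 square = [j] + square                 # C5 * n^2
--             elif j > i:                               # C6 * n^2
--                 square = [0] + square                 # C7 * n^2
--     return square                                     # C8
-- ===== SOURCE B (Python) =====
-- def squareUp(n):
--     out = []
--     for i in range(1, n + 1):
--         out.extend([0] * (n - i))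
--         out.extend(range(i, 0, -1))
--     return out
-- ===== Notes on version B (the rewrite author's own statement) =====
-- stated objective: faster
-- what changed: A scans every column j of every row with a per-element if/elif and prepends singleton lists to the front (copying the whole accumulator each time); B constructs each row directly as a zero block plus a descending range and extends the output in place, row by row.
import Mathlib
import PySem

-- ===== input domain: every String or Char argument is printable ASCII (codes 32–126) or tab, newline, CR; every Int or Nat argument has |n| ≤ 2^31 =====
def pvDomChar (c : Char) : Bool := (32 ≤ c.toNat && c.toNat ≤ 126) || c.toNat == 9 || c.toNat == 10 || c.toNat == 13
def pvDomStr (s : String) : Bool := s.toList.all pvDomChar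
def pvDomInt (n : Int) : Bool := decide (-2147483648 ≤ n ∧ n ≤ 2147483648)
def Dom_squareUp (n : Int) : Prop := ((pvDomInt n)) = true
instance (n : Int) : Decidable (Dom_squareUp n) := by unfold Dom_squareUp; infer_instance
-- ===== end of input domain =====

-- B builds each row directly as a zero block plus a descending range and appends rows
-- in order, instead of A's per-element branch-and-prepend double loop (objective: simpler).

-- ===== PORT A =====
def squareUp (n : Int) : List Int :=
  (PySem.List.pyRange n 0 (-1)).foldl (fun square i =>
    (PySem.List.pyRange 1 (n + 1) 1).foldl (fun square j =>
      if j ≤ i then [j] ++ square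
      else if j > i then [0] ++ square
      else square) square) []

-- ===== PORT B =====
def squareUp_alt (n : Int) : List Int :=
  (PySem.List.pyRange 1 (n + 1) 1).foldl (fun out i =>
    (out ++ List.replicate (n - i).toNat 0) ++ PySem.List.pyRange i 0 (-1)) []

-- ===== PRECONDITION & SPEC =====
def Spec_squareUp (n : Int) (out : List Int) : Prop := out = squareUp_alt n
instance (n : Int) (out : List Int) : Decidable (Spec_squareUp n out) := by unfold Spec_squareUp; infer_instance

-- ===== CLAIM (what is proved, stated in full; the proofs are below) =====
def Claim_equal_squareUp : Prop := ∀ (n : Int), Dom_squareUp n → Spec_squareUp n (squareUp n)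

-- ===== LEMMAS AND PROOFS =====

-- A's inner loop prepends one element per j: it is the reversed map, pushed onto the accumulator.
lemma inner_fold_eq (i : Int) : ∀ (l sq : List Int),
    l.foldl (fun square j =>
      if j ≤ i then [j] ++ square
      else if j > i then [0] ++ square
      else square) sq
    = (l.map (fun j => if j ≤ i then j else 0)).reverse ++ sq := by
  intro l
  induction l with
  | nil => intro sq; simp
  | cons a t ih =>
    intro sq
    rw [List.foldl_cons]
    by_cases h : a ≤ i
    · rw [if_pos h, ih]; simp [h]
    · rw [if_neg h, if_pos (show a > i by omega), ih]; simp [h]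

-- A's row for 1 ≤ i ≤ n is exactly B's row: (n-i) zeros then i, i-1, …, 1.
lemma row_eq (n i : Int) (h1 : 1 ≤ i) (h2 : i ≤ n) :
    ((PySem.List.pyRange 1 (n + 1) 1).map (fun j => if j ≤ i then j else 0)).reverse
    = List.replicate (n - i).toNat 0 ++ PySem.List.pyRange i 0 (-1) := by
  rw [PySem.List.pyRange_one_append 1 (i + 1) (n + 1) (by omega) (by omega)]
  rw [List.map_append, List.reverse_append]
  have hl : (PySem.List.pyRange 1 (i + 1) 1).map (fun j => if j ≤ i then j else 0)
      = PySem.List.pyRange 1 (i + 1) 1 := by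
    conv_rhs => rw [← List.map_id (PySem.List.pyRange 1 (i + 1) 1)]
    apply List.map_congr_left
    intro j hj
    have := (PySem.List.mem_pyRange_one (x := j) (a := 1) (b := i+1)).mp (by simpa using hj)
    simp only [id]
    rw [if_pos (by omega)]
  have hr : (PySem.List.pyRange (i + 1) (n + 1) 1).map (fun j => if j ≤ i then j else 0)
      = List.replicate (n - i).toNat 0 := by
    have : (PySem.List.pyRange (i + 1) (n + 1) 1).map (fun j => if j ≤ i then j else 0)
        = (PySem.List.pyRange (i + 1) (n + 1) 1).map (fun _ => (0 : Int)) := by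
      apply List.map_congr_left
      intro j hj
      have := (PySem.List.mem_pyRange_one (x := j) (a := i+1) (b := n+1)).mp hj
      rw [if_neg (by omega)]
    rw [this, List.map_const']
    rw [PySem.List.length_pyRange_one]
    congr 1
    omega
  rw [hl, hr, List.reverse_replicate]
  rw [PySem.List.pyRange_neg_one_eq_reverse i 0]
  norm_num
-- A's outer loop prepends whole rows; it equals the flatten of the reversed row list.
lemma outer_fold_eq (g : Int → List Int) : ∀ (l : List Int) (sq : List Int),
    l.foldl (fun square i => g i ++ square) sq = (l.reverse.map g).flatten ++ sq := by
  intro l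
  induction l with
  | nil => intro sq; simp
  | cons a t ih => intro sq; simp [ih]

-- B's loop appends rows left to right; it equals the flatten of the row list.
lemma append_fold_eq (f g : Int → List Int) : ∀ (l : List Int) (acc : List Int),
    l.foldl (fun out i => (out ++ f i) ++ g i) acc
    = acc ++ (l.map (fun i => f i ++ g i)).flatten := by
  intro l
  induction l with
  | nil => intro acc; simp
  | cons a t ih => intro acc; simp

-- ===== VERDICT (by name: the statement is the Claim_ definition above) =====
theorem squareUp_spec : Claim_equal_squareUp := by
  intro n _
  unfold Spec_squareUp squareUp squareUp_alt
  -- replace A's inner loop by its row, then both sides by flattens over pyRange 1 (n+1) 1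
  have hA : (PySem.List.pyRange n 0 (-1)).foldl (fun square i =>
      (PySem.List.pyRange 1 (n + 1) 1).foldl (fun square j =>
        if j ≤ i then [j] ++ square
        else if j > i then [0] ++ square
        else square) square) []
      = (PySem.List.pyRange n 0 (-1)).foldl (fun square i =>
          (List.replicate (n - i).toNat 0 ++ PySem.List.pyRange i 0 (-1)) ++ square) [] := by
    apply PySem.List.foldl_congr_mem
    intro sq i hi
    have hmem := (PySem.List.mem_pyRange_neg_one (x := i) (a := n) (b := 0)).mp hi
    rw [inner_fold_eq, row_eq n i (by omega) (by omega)]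
  rw [hA, outer_fold_eq, append_fold_eq]
  rw [show (PySem.List.pyRange n 0 (-1)).reverse = PySem.List.pyRange 1 (n + 1) 1 by
    rw [PySem.List.pyRange_neg_one_eq_reverse n 0]
    norm_num]
  simp
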